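-- pv_equiv track=rewrite | github.com/yuhee97/Programmers-Algorithm | level1/문자열내마음대로정렬하기lv1.py | solution
-- ===== SOURCE A (Python) =====
-- def solution(strings, n):
--     stack = []; result = []
--     strings.sort()
--     for i in range(len(strings)):
--         stack.append([strings[i][n], i])
--     stack.sort()
--     for i in stack:
--         result.append(strings[i[1]])
--     return result
-- ===== SOURCE B (Python) =====
-- def solution(strings, n):
--     strings.sort()
--     buckets = {}
--     for s in strings:
--         buckets.setdefault(s[n], []).append(s)
--     out = []
--     for c in sorted(buckets):
--         out += buckets[c]
--     return out
-- ===== Notes on version B (the rewrite author's own statement) =====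
-- stated objective: alternative
-- what changed: Replaced A's second full sort (decorate each string with [nth-char, index], sort the pair list, reconstruct by index) with a single-pass group-by: bucket the alphabetically sorted strings by their nth character in a dict, then emit the buckets in sorted key order, so only one full-list sort remains.
import Mathlib
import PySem

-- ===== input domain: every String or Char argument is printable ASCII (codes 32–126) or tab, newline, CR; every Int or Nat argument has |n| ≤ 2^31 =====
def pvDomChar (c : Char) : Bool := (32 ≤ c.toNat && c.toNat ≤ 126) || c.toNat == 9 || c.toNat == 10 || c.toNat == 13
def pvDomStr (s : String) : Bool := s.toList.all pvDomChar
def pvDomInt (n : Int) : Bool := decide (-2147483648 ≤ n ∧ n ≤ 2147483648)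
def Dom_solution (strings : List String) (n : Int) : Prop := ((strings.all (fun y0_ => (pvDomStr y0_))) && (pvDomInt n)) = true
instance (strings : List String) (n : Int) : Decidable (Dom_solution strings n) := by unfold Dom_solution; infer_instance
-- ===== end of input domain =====

-- B replaces A's second full sort (decorate with [char,index], sort the pairs, reconstruct by
-- index) with a single-pass GROUP-BY: bucket the alphabetically sorted strings by their nth
-- character in a dict, then emit the buckets in sorted key order; one full sort instead of two.
-- Both A and B sort `strings` in place first (identical side effect); the claim is about the return value.

-- ===== PORT A =====
def solution (strings : List String) (n : Int) : List String :=
  let ss := PySem.List.sorted strings (fun s => s) false          -- strings.sort()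
  let stack := (PySem.List.pyRange 0 (PySem.List.len ss) 1).foldl -- for i in range(len(strings)): stack.append([strings[i][n], i])
      (fun acc i => acc ++ [(PySem.List.pyGetD (PySem.List.pyGetD ss i "").toList n ' ', i)])
      ([] : List (Char × Int))                                    -- pyGetD is exact here: Pre_ puts n in range
  let stack2 := PySem.List.sorted2 stack (fun p => p.1) (fun p => p.2) false  -- stack.sort()
  stack2.foldl (fun acc p => acc ++ [PySem.List.pyGetD ss p.2 ""]) ([] : List String)

-- ===== PORT B =====
def solution_alt (strings : List String) (n : Int) : List String :=
  let ss := PySem.List.sorted strings (fun s => s) false          -- strings.sort()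
  let buckets := ss.foldl                                         -- for s in strings: buckets.setdefault(s[n], []).append(s)
      (fun d s => PySem.Dict.modify d (PySem.List.pyGetD s.toList n ' ') [] (fun l => l ++ [s]))
      (PySem.Dict.empty : PySem.Dict Char (List String))          -- setdefault+append = modify with default [] and append (exact)
  (PySem.List.sorted (PySem.Dict.keys buckets) (fun c => c) false).foldl  -- for c in sorted(buckets): out += buckets[c]
      (fun acc c => acc ++ PySem.Dict.getD buckets c []) ([] : List String)  -- getD is exact: c is a key of buckets

-- ===== PRECONDITION & SPEC =====
-- Pre_ excludes exactly the inputs where Python A raises IndexError (n out of range for some string); B raises there too.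
def Pre_solution (strings : List String) (n : Int) : Prop :=
  ∀ s ∈ strings, PySem.Raise.InRange s.toList.length n
instance (strings : List String) (n : Int) : Decidable (Pre_solution strings n) := by unfold Pre_solution; infer_instance
def pvWitness_solution : List String × Int := (["sun", "bed", "car"], 1)

def Spec_solution (strings : List String) (n : Int) (out : List String) : Prop := out = solution_alt strings n
instance (strings : List String) (n : Int) (out : List String) : Decidable (Spec_solution strings n out) := by unfold Spec_solution; infer_instance

-- ===== CLAIM (what is proved, stated in full; the proofs are below) =====
def Claim_equal_solution : Prop := ∀ (strings : List String) (n : Int), Dom_solution strings n → Pre_solution strings n → Spec_solution strings n (solution strings n)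

-- ===== LEMMAS AND PROOFS =====

-- Python's list.sort() on [char, index] pairs (sorted2 with the two projections) is a single
-- keyed sort by the lexicographic product key: the two insertion predicates agree pointwise.
theorem sorted2_eq_sorted_toLex {α κ₁ κ₂ : Type} [LinearOrder κ₁] [LinearOrder κ₂]
    (xs : List α) (k1 : α → κ₁) (k2 : α → κ₂) :
    PySem.List.sorted2 xs k1 k2 false = PySem.List.sorted xs (fun x => toLex (k1 x, k2 x)) false := by
  unfold PySem.List.sorted2 PySem.List.sorted
  simp only [Bool.false_eq_true, if_false]
  congr 1
  funext acc x
  congr 1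
  funext a b
  rw [Bool.eq_iff_iff]
  simp only [Bool.or_eq_true, Bool.and_eq_true, Bool.not_eq_true', decide_eq_true_eq,
    decide_eq_false_iff_not, Prod.Lex.toLex_lt_toLex]
  rcases lt_trichotomy (k1 a) (k1 b) with h | h | h
  · simp [h]
  · simp [h]
  · simp [h.ne', not_lt.mpr h.le]
    intro h'
    exact absurd h' (not_le.mpr h)

-- Bucketing: concatenating, over a duplicate-free list of keys covering every c-value of ss,
-- the c-fibres of ss is a permutation of ss.
theorem flatMap_filter_perm {α κ : Type} [DecidableEq κ] (c : α → κ) :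
    ∀ (ks : List κ) (ss : List α), ks.Nodup → (∀ s ∈ ss, c s ∈ ks) →
      (ks.flatMap (fun k => ss.filter (fun s => c s == k))).Perm ss := by
  intro ks
  induction ks with
  | nil =>
    intro ss _ hcov
    cases ss with
    | nil => simp
    | cons s t => exact absurd (hcov s (by simp)) (by simp)
  | cons k ks ih =>
    intro ss hnd hcov
    rw [List.flatMap_cons]
    have hknotin : k ∉ ks := (List.nodup_cons.mp hnd).1
    have hfib : ∀ k' ∈ ks, ss.filter (fun s => c s == k')
        = (ss.filter (fun s => !(c s == k))).filter (fun s => c s == k') := by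
      intro k' hk'
      have hne : k' ≠ k := fun h => hknotin (h ▸ hk')
      rw [List.filter_filter]
      apply List.filter_congr
      intro s _
      by_cases h : c s = k'
      · simp [h]
        exact hne
      · simp [h]
    have hmap : ks.flatMap (fun k' => ss.filter (fun s => c s == k'))
        = ks.flatMap (fun k' => (ss.filter (fun s => !(c s == k))).filter (fun s => c s == k')) :=
      List.flatMap_congr hfib
    rw [hmap]
    have hcov' : ∀ s ∈ ss.filter (fun s => !(c s == k)), c s ∈ ks := by
      intro s hs
      rw [List.mem_filter] at hs
      have := hcov s hs.1
      simp only [List.mem_cons] at this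
      rcases this with h | h
      · exact absurd h (by simpa using hs.2)
      · exact h
    have hperm' := ih (ss.filter (fun s => !(c s == k))) (List.nodup_cons.mp hnd).2 hcov'
    exact (hperm'.append_left (ss.filter (fun s => c s == k))).trans
      (List.filter_append_perm _ ss)

-- B's output literally: the sorted distinct key list, flat-mapped through the c-fibres of the
-- alphabetically sorted list.
theorem alt_eq_flatMap (strings : List String) (n : Int) :
    solution_alt strings n =
      (PySem.List.sorted (PySem.Set.ofList ((PySem.List.sorted strings (fun s => s) false).map
          (fun s => PySem.List.pyGetD s.toList n ' '))) (fun c => c) false).flatMap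
        (fun k => (PySem.List.sorted strings (fun s => s) false).filter
          (fun s => PySem.List.pyGetD s.toList n ' ' == k)) := by
  unfold solution_alt
  dsimp only
  rw [PySem.List.foldl_append_eq_flatMap, List.nil_append]
  have hk := PySem.Dict.keys_foldl_modify_key (PySem.List.sorted strings (fun s => s) false)
      (fun s => PySem.List.pyGetD s.toList n ' ') ([] : List String)
      (fun _ s l => l ++ [s]) (PySem.Dict.empty : PySem.Dict Char (List String))
  simp only [PySem.Dict.keys_empty, PySem.Set.update_nil_left] at hk
  rw [hk]
  apply List.flatMap_congr
  intro k _
  have hg : (PySem.List.sorted strings (fun s => s) false).foldl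
      (fun d s => PySem.Dict.modify d (PySem.List.pyGetD s.toList n ' ') [] (fun l => l ++ [s]))
      (PySem.Dict.empty : PySem.Dict Char (List String))
      = ((PySem.List.sorted strings (fun s => s) false).map
          (fun s => (PySem.List.pyGetD s.toList n ' ', s))).foldl
        (fun d p => PySem.Dict.modify d p.1 [] (fun l => l ++ [p.2])) PySem.Dict.empty := by
    rw [List.foldl_map]
  rw [hg, PySem.Dict.getD_foldl_modify_append]
  simp [List.filter_map, Function.comp_def]

-- A's pair-sort-then-reconstruct vs B's bucketing: both are permutations of the alphabetically
-- sorted list and both are pairwise ordered under the injective key s ↦ (s[n], s), hence equal.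
theorem solution_eq_alt (strings : List String) (n : Int) :
    solution strings n = solution_alt strings n := by
  rw [alt_eq_flatMap]
  unfold solution
  dsimp only
  rw [PySem.List.foldl_append_singleton_eq_map, PySem.List.foldl_append_singleton_eq_map]
  simp only [List.nil_append]
  rw [sorted2_eq_sorted_toLex]
  set ss := PySem.List.sorted strings (fun s => s) false with hss
  set c : String → Char := fun s => PySem.List.pyGetD s.toList n ' ' with hc
  set keyB : String → Lex (Char × String) := fun s => toLex (c s, s) with hkeyB
  set stack := (PySem.List.pyRange 0 (PySem.List.len ss) 1).map
      (fun i => (c (PySem.List.pyGetD ss i ""), i)) with hstack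
  set ks := PySem.List.sorted (PySem.Set.ofList (ss.map c)) (fun x => x) false with hks
  have hks_nodup : ks.Nodup :=
    ((PySem.List.sorted_perm _ _ _).nodup_iff).mpr (PySem.Set.nodup_ofList _)
  have hks_cov : ∀ s ∈ ss, c s ∈ ks := by
    intro s hs
    rw [hks, PySem.List.mem_sorted, PySem.Set.mem_ofList]
    exact List.mem_map_of_mem hs
  have hks_lt : ks.Pairwise (· < ·) := PySem.List.sorted_ofList_pairwise_lt _
  have hmapss : stack.map (fun p => PySem.List.pyGetD ss p.2 "") = ss := by
    rw [hstack, List.map_map]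
    exact PySem.List.map_pyGetD_pyRange_zero ss ""
  have hBperm : (ks.flatMap (fun k => ss.filter (fun s => c s == k))).Perm ss :=
    flatMap_filter_perm c ks ss hks_nodup hks_cov
  apply PySem.List.eq_of_perm_of_pairwise_le_of_injective keyB
  · intro a b h
    have := congrArg (fun x => (ofLex x).2) h
    simpa [hkeyB] using this
  · refine ((PySem.List.sorted_perm _ _ _).map _).trans ?_
    rw [hmapss]
    exact hBperm.symm
  · rw [List.pairwise_map]
    refine (PySem.List.sorted_pairwise stack (fun p => toLex (p.1, p.2))).imp_of_mem ?_
    intro p q hp hq hle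
    have hp' := (PySem.List.mem_sorted _ _ _ _).mp hp
    have hq' := (PySem.List.mem_sorted _ _ _ _).mp hq
    rw [hstack, List.mem_map] at hp' hq'
    obtain ⟨i, hi, rfl⟩ := hp'
    obtain ⟨j, hj, rfl⟩ := hq'
    rw [PySem.List.mem_pyRange_one] at hi hj
    rw [PySem.List.len_eq] at hi hj
    have hjlt : j.toNat < ss.length := by omega
    have hgi : PySem.List.pyGetD ss i "" = ss[i.toNat] :=
      PySem.List.pyGetD_eq_getElem ss "" hi.1 hi.2
    have hgj : PySem.List.pyGetD ss j "" = ss[j.toNat] :=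
      PySem.List.pyGetD_eq_getElem ss "" hj.1 hj.2
    rw [Prod.Lex.le_iff] at hle ⊢
    simp only at hle ⊢
    rcases hle with h1 | ⟨h1, h2⟩
    · exact Or.inl h1
    · refine Or.inr ⟨by rw [hgi, hgj] at h1 ⊢; exact h1, ?_⟩
      rw [hgi, hgj]
      exact PySem.List.sorted_id_getElem_mono strings (Int.toNat_le_toNat h2) hjlt
  · have hss_le : ss.Pairwise (· ≤ ·) := PySem.List.sorted_pairwise strings (fun s => s)
    rw [List.flatMap_def, List.pairwise_flatten]
    constructor
    · intro l hl
      rw [List.mem_map] at hl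
      obtain ⟨k, _, rfl⟩ := hl
      refine (hss_le.filter _).imp_of_mem ?_
      intro a b ha hb hab
      have hca : c a = k := by simpa using (List.mem_filter.mp ha).2
      have hcb : c b = k := by simpa using (List.mem_filter.mp hb).2
      rw [hkeyB, Prod.Lex.le_iff]
      exact Or.inr ⟨by simp [hca, hcb], hab⟩
    · rw [List.pairwise_map]
      refine hks_lt.imp_of_mem ?_
      intro k k' _ _ hkk' a ha b hb
      have hca : c a = k := by simpa using (List.mem_filter.mp ha).2
      have hcb : c b = k' := by simpa using (List.mem_filter.mp hb).2
      rw [hkeyB, Prod.Lex.le_iff]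
      left
      simp only [hca, hcb]
      exact hkk'

-- ===== VERDICT (by name: the statement is the Claim_ definition above) =====
theorem solution_spec : Claim_equal_solution := by
  intro strings n _ _
  unfold Spec_solution
  exact solution_eq_alt strings n
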